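-- pv_equiv track=rewrite | github.com/hafifbilgiler/skylight-bot-v2 | services/smarttools/smart_tools.py | _keyword_rerank
-- ===== SOURCE A (Python) =====
-- from typing import Optional, List, Dict
--
-- def _keyword_rerank(query: str, chunks: List[str], top_k: int) -> List[str]:
--     """Basit keyword overlap skoru — API olmadan rerank."""
--     q_words = set(query.lower().split())
--     scored  = []
--     for chunk in chunks:
--         c_words = set(chunk.lower().split())
--         score   = len(q_words & c_words) / (len(q_words) + 1)
--         scored.append((chunk, score))
--     scored.sort(key=lambda x: x[1], reverse=True)
--     return [c for c, _ in scored[:top_k]]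
-- ===== SOURCE B (Python) =====
-- from typing import List
--
-- def _keyword_rerank(query: str, chunks: List[str], top_k: int) -> List[str]:
--     """Rerank via an inverted index: loop over query words, not over chunk x query pairs."""
--     q_words = set(query.lower().split())
--     word_sets = [set(c.lower().split()) for c in chunks]
--     index = {}
--     for i, ws in enumerate(word_sets):
--         for w in ws:
--             index.setdefault(w, []).append(i)
--     counts = [0] * len(chunks)
--     for w in q_words:
--         for i in index.get(w, ()):
--             counts[i] += 1
--     d = len(q_words) + 1
--     scored = sorted(zip(chunks, (c / d for c in counts)), key=lambda x: x[1], reverse=True)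
--     return [c for c, _ in scored[:top_k]]
-- ===== Notes on version B (the rewrite author's own statement) =====
-- stated objective: alternative
-- what changed: Replaces the per-chunk set-intersection loop with an inverted index (word -> chunk indices) built in one pass; scores are accumulated by looping over the query words only, then chunks are sorted by the same stable descending key.
import Mathlib
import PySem

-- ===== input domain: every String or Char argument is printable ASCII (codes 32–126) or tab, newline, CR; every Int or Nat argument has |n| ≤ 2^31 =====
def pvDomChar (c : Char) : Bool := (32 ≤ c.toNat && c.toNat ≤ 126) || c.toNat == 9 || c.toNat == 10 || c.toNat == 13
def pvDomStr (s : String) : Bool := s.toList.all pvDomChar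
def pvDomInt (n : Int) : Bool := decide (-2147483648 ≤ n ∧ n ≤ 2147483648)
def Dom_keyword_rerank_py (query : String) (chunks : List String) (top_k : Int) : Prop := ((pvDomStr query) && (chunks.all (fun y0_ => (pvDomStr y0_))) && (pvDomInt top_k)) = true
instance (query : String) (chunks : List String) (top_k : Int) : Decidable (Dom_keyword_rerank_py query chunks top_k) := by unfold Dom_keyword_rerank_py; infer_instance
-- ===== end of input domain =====

-- B replaces the per-chunk set-intersection with an inverted index over the chunks,
-- accumulating scores by looping over the query words only (alternative decomposition, same results).


-- ===== PORT A =====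
-- score is a float in Python; here ℚ (exact: both programs divide the same integers by the same positive denominator)
def keyword_rerank_py (query : String) (chunks : List String) (top_k : Int) : List String :=
  let q_words : PySem.Set String := PySem.Set.ofList (PySem.Str.split₀ (PySem.Str.lower query))
  let scored : List (String × ℚ) := chunks.foldl (fun acc chunk =>
    let c_words : PySem.Set String := PySem.Set.ofList (PySem.Str.split₀ (PySem.Str.lower chunk))
    let score : ℚ := ((PySem.Set.inter q_words c_words).length : ℚ) / ((q_words.length : ℚ) + 1)
    acc ++ [(chunk, score)]) []
  (PySem.List.slice (PySem.List.sorted scored (fun x => x.2) true) none (some top_k)).map (fun p => p.1)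

-- ===== PORT B =====
def keyword_rerank_py_alt (query : String) (chunks : List String) (top_k : Int) : List String :=
  let q_words : PySem.Set String := PySem.Set.ofList (PySem.Str.split₀ (PySem.Str.lower query))
  let word_sets : List (PySem.Set String) := chunks.map (fun c => PySem.Set.ofList (PySem.Str.split₀ (PySem.Str.lower c)))
  let index : PySem.Dict String (List Int) :=
    (PySem.List.enumerate word_sets).foldl (fun d p =>
      p.2.foldl (fun d w => d.insert w (d.getD w [] ++ [p.1])) d) PySem.Dict.empty
  let counts : List Int := q_words.foldl (fun cnts w =>
      (index.getD w []).foldl (fun cnts i =>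
        PySem.List.pySetD cnts i (PySem.List.pyGetD cnts i 0 + 1)) cnts)
    (List.replicate chunks.length (0 : Int))
  let d : Int := (q_words.length : Int) + 1
  let scored : List (String × ℚ) :=
    PySem.List.sorted (chunks.zip (counts.map (fun (c : Int) => (c : ℚ) / (d : ℚ)))) (fun x => x.2) true
  (PySem.List.slice scored none (some top_k)).map (fun p => p.1)

-- ===== PRECONDITION & SPEC =====
def Spec_keyword_rerank_py (query : String) (chunks : List String) (top_k : Int) (out : List String) : Prop := out = keyword_rerank_py_alt query chunks top_k
instance (query : String) (chunks : List String) (top_k : Int) (out : List String) : Decidable (Spec_keyword_rerank_py query chunks top_k out) := by unfold Spec_keyword_rerank_py; infer_instance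

-- ===== CLAIM (what is proved, stated in full; the proofs are below) =====
def Claim_equal_keyword_rerank_py : Prop := ∀ (query : String) (chunks : List String) (top_k : Int), Dom_keyword_rerank_py query chunks top_k → Spec_keyword_rerank_py query chunks top_k (keyword_rerank_py query chunks top_k)

-- ===== LEMMAS AND PROOFS =====

-- processing one chunk's (nodup) word set appends its index to exactly the entries of its words
theorem pv_inner_getD (s : List String) (hs : s.Nodup) (d : PySem.Dict String (List Int))
    (v : Int) (w : String) :
    (s.foldl (fun d w' => d.insert w' (d.getD w' [] ++ [v])) d).getD w []
      = d.getD w [] ++ (if w ∈ s then [v] else []) := by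
  induction s generalizing d with
  | nil => simp
  | cons a t ih =>
    simp only [List.foldl_cons]
    rw [ih (by simpa using hs.of_cons)]
    by_cases haw : w = a
    · subst haw
      have : w ∉ t := by simpa using (List.nodup_cons.mp hs).1
      simp [this]
    · simp [PySem.Dict.getD_insert, haw]

-- the inverted index maps each word to the indices (in order) of the sets containing it
theorem pv_index_getD (l : List (PySem.Set String)) (hl : ∀ s ∈ l, s.Nodup)
    (st : Nat) (d : PySem.Dict String (List Int)) (w : String) :
    ((PySem.List.enumerate l (st : Int)).foldl (fun d p =>
        p.2.foldl (fun d w' => d.insert w' (d.getD w' [] ++ [p.1])) d) d).getD w []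
      = d.getD w [] ++ ((PySem.List.enumerate l (st : Int)).filterMap
          (fun p => if w ∈ p.2 then some p.1 else none)) := by
  induction l generalizing st d with
  | nil => simp [PySem.List.enumerate]
  | cons s t ih =>
    rw [PySem.List.enumerate_cons]
    simp only [List.foldl_cons, List.filterMap_cons]
    have hst : ((st : Int) + 1) = ((st + 1 : Nat) : Int) := by push_cast; ring
    rw [hst, ih (fun x hx => hl x (List.mem_cons_of_mem _ hx))]
    rw [pv_inner_getD s (hl s (List.mem_cons_self)) d ((st : Nat) : Int) w]
    by_cases hw : w ∈ s <;> simp [hw]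

-- bumping a nodup list of in-range positions adds 1 exactly at those positions
theorem pv_bump (L : List Int) (hL : L.Nodup) (c : List Int)
    (hin : ∀ i ∈ L, 0 ≤ i ∧ i < (c.length : Int)) (j : Nat) (hj : j < c.length) :
    (L.foldl (fun c i => PySem.List.pySetD c i (PySem.List.pyGetD c i 0 + 1)) c).getD j 0
      = c.getD j 0 + (if (j : Int) ∈ L then 1 else 0) := by
  induction L generalizing c with
  | nil => simp
  | cons i t ih =>
    obtain ⟨hi0, hilen⟩ := hin i (List.mem_cons_self)
    simp only [List.foldl_cons]
    have hlen' : (PySem.List.pySetD c i (PySem.List.pyGetD c i 0 + 1)).length = c.length := by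
      rw [PySem.List.length_pySetD]
    rw [ih (List.nodup_cons.mp hL).2 _ (by rw [hlen']; intro x hx; exact hin x (List.mem_cons_of_mem _ hx)) (by omega)]
    rw [PySem.List.pySetD_of_nonneg _ _ hi0]
    by_cases hji : (j : Int) = i
    · have hjt : (j : Int) ∉ t := hji ▸ (List.nodup_cons.mp hL).1
      subst hji
      simp only [Int.toNat_natCast]
      simp [hjt, List.getD_eq_getElem?_getD, hj, PySem.List.pyGetD_natCast]
    · have hne : i.toNat ≠ j := by omega
      simp [List.getD_eq_getElem?_getD, List.getElem?_set_ne hne, List.mem_cons, hji]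

-- length is preserved through the whole counting fold
theorem pv_counts_length (Q : List String) (D : PySem.Dict String (List Int)) (c : List Int) :
    (Q.foldl (fun c w => (D.getD w []).foldl (fun c i =>
        PySem.List.pySetD c i (PySem.List.pyGetD c i 0 + 1)) c) c).length = c.length := by
  induction Q generalizing c with
  | nil => rfl
  | cons w t ih =>
    rw [List.foldl_cons, ih]
    generalize D.getD w [] = L
    induction L generalizing c with
    | nil => rfl
    | cons i s ih2 =>
      rw [List.foldl_cons, ih2, PySem.List.length_pySetD]

-- the whole counting fold: position j ends at the number of processed words w with (j:Int) ∈ idx w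
theorem pv_counts (Q : List String) (D : PySem.Dict String (List Int))
    (hidx : ∀ w, (D.getD w []).Nodup) (c : List Int)
    (hin : ∀ w, ∀ i ∈ D.getD w [], 0 ≤ i ∧ i < (c.length : Int)) (j : Nat) (hj : j < c.length) :
    (Q.foldl (fun c w => (D.getD w []).foldl (fun c i =>
        PySem.List.pySetD c i (PySem.List.pyGetD c i 0 + 1)) c) c).getD j 0
      = c.getD j 0 + ((Q.filter (fun w => decide ((j : Int) ∈ D.getD w []))).length : Int) := by
  induction Q generalizing c with
  | nil => simp
  | cons w t ih =>
    simp only [List.foldl_cons, List.filter_cons]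
    have hlen : ((D.getD w []).foldl (fun c i =>
        PySem.List.pySetD c i (PySem.List.pyGetD c i 0 + 1)) c).length = c.length := by
      have := pv_counts_length [w] D c; simpa using this
    rw [ih _ (by rw [hlen]; exact hin) (by omega)]
    rw [pv_bump (D.getD w []) (hidx w) c (hin w) j hj]
    by_cases hmem : (j : Int) ∈ D.getD w [] <;> simp [hmem] <;> push_cast <;> ring

theorem pv_filterMap_if {α β : Type} (P : α → Prop) [DecidablePred P] (f : α → β) (l : List α) :
    l.filterMap (fun x => if P x then some (f x) else none) = (l.filter (fun x => decide (P x))).map f := by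
  induction l with
  | nil => rfl
  | cons a t ih => by_cases h : P a <;> simp [h, ih]

-- characterisation of the inverted index entry for word w (n chunks, sets W)
theorem pv_idx_spec (W : List (PySem.Set String)) (hW : ∀ s ∈ W, s.Nodup) (w : String) :
    ((PySem.List.enumerate W).foldl (fun d p =>
        p.2.foldl (fun d w' => d.insert w' (d.getD w' [] ++ [p.1])) d) PySem.Dict.empty).getD w []
      = ((PySem.List.enumerate W).filter (fun p => decide (w ∈ p.2))).map (·.1) := by
  rw [show PySem.List.enumerate W = PySem.List.enumerate W ((0 : Nat) : Int) by norm_num]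
  rw [pv_index_getD W hW 0 PySem.Dict.empty w]
  rw [pv_filterMap_if (fun p => w ∈ p.2) (·.1) (PySem.List.enumerate W ((0:Nat):Int))]
  simp [PySem.Dict.empty, PySem.Dict.getD, PySem.Dict.get?]

theorem pv_idx_nodup (W : List (PySem.Set String)) (w : String) :
    (((PySem.List.enumerate W).filter (fun p => decide (w ∈ p.2))).map (·.1)).Nodup := by
  have hp : ((PySem.List.enumerate W).filter (fun p => decide (w ∈ p.2))).Pairwise
      (fun p q => p.1 < q.1) :=
    List.Pairwise.sublist List.filter_sublist (PySem.List.pairwise_lt_enumerate W 0)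
  exact List.pairwise_map.mpr (hp.imp (fun h => ne_of_lt h))

theorem pv_idx_mem (W : List (PySem.Set String)) (w : String) (j : Int) :
    j ∈ (((PySem.List.enumerate W).filter (fun p => decide (w ∈ p.2))).map (·.1))
      ↔ ∃ (k : Nat) (h : k < W.length), j = (k : Int) ∧ w ∈ W[k] := by
  simp only [List.mem_map, List.mem_filter, PySem.List.mem_enumerate_iff]
  constructor
  · rintro ⟨p, ⟨⟨k, hk, rfl⟩, hw⟩, rfl⟩
    exact ⟨k, hk, by simp, by simpa using hw⟩
  · rintro ⟨k, hk, rfl, hw⟩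
    exact ⟨((k : Int), W[k]), ⟨⟨k, hk, by simp⟩, by simpa using hw⟩, by simp⟩

-- the two scored lists (before sorting) are equal
theorem pv_scored_eq (Q : PySem.Set String) (chunks : List String) :
    chunks.foldl (fun acc chunk =>
        acc ++ [(chunk, ((PySem.Set.inter Q (PySem.Set.ofList (PySem.Str.split₀ (PySem.Str.lower chunk)))).length : ℚ) / ((Q.length : ℚ) + 1))]) ([] : List (String × ℚ))
    = chunks.zip ((Q.foldl (fun cnts w => ((((PySem.List.enumerate (chunks.map (fun c => PySem.Set.ofList (PySem.Str.split₀ (PySem.Str.lower c))))).foldl (fun d p => p.2.foldl (fun d w' => d.insert w' (d.getD w' [] ++ [p.1])) d) PySem.Dict.empty)).getD w []).foldl (fun cnts i => PySem.List.pySetD cnts i (PySem.List.pyGetD cnts i 0 + 1)) cnts) (List.replicate chunks.length (0 : Int))).map (fun (c : Int) => (c : ℚ) / ((((Q.length : Int) + 1 : Int)) : ℚ))) := by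
  rw [PySem.List.foldl_append_singleton_eq_map]
  have hWn : ∀ s ∈ (chunks.map (fun c => PySem.Set.ofList (PySem.Str.split₀ (PySem.Str.lower c)))), s.Nodup := by
    intro s hs
    obtain ⟨c, _, rfl⟩ := List.mem_map.mp hs
    exact PySem.Set.nodup_ofList _
  have hidx := pv_idx_spec (chunks.map (fun c => PySem.Set.ofList (PySem.Str.split₀ (PySem.Str.lower c)))) hWn
  have hnodup : ∀ w, ((((PySem.List.enumerate (chunks.map (fun c => PySem.Set.ofList (PySem.Str.split₀ (PySem.Str.lower c))))).foldl (fun d p => p.2.foldl (fun d w' => d.insert w' (d.getD w' [] ++ [p.1])) d) PySem.Dict.empty)).getD w []).Nodup := by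
    intro w; rw [hidx w]; exact pv_idx_nodup _ w
  have hin : ∀ w, ∀ i ∈ (((PySem.List.enumerate (chunks.map (fun c => PySem.Set.ofList (PySem.Str.split₀ (PySem.Str.lower c))))).foldl (fun d p => p.2.foldl (fun d w' => d.insert w' (d.getD w' [] ++ [p.1])) d) PySem.Dict.empty)).getD w [],
      0 ≤ i ∧ i < ((List.replicate chunks.length (0 : Int)).length : Int) := by
    intro w i hi
    rw [hidx w, pv_idx_mem] at hi
    obtain ⟨k, hk, rfl, -⟩ := hi
    simp only [List.length_map] at hk
    simp only [List.length_replicate]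
    omega
  have hclen : (Q.foldl (fun cnts w => ((((PySem.List.enumerate (chunks.map (fun c => PySem.Set.ofList (PySem.Str.split₀ (PySem.Str.lower c))))).foldl (fun d p => p.2.foldl (fun d w' => d.insert w' (d.getD w' [] ++ [p.1])) d) PySem.Dict.empty)).getD w []).foldl (fun cnts i => PySem.List.pySetD cnts i (PySem.List.pyGetD cnts i 0 + 1)) cnts) (List.replicate chunks.length (0 : Int))).length = chunks.length := by
    simpa using pv_counts_length Q _ (List.replicate chunks.length (0 : Int))
  apply List.ext_getElem
  · simp [hclen]
  · intro j hj1 hj2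
    have hjn : j < chunks.length := by simpa using hj1
    rw [List.getElem_append_right (by simp), List.getElem_zip]
    simp only [List.getElem_map]
    refine Prod.ext rfl ?_
    simp only
    have hcnt := pv_counts Q _ hnodup (List.replicate chunks.length (0 : Int)) hin j
      (by simpa using hjn)
    rw [List.getD_eq_getElem _ _ (show j < (List.replicate chunks.length (0 : Int)).length by simpa using hjn)] at hcnt
    rw [List.getD_eq_getElem _ _ (show j < _ by rw [hclen]; exact hjn)] at hcnt
    rw [hcnt]
    have hfc : (Q.filter (fun w => decide ((j : Int) ∈ (((PySem.List.enumerate (chunks.map (fun c => PySem.Set.ofList (PySem.Str.split₀ (PySem.Str.lower c))))).foldl (fun d p => p.2.foldl (fun d w' => d.insert w' (d.getD w' [] ++ [p.1])) d) PySem.Dict.empty)).getD w [])))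
        = Q.filter (fun w => (PySem.Set.ofList (PySem.Str.split₀ (PySem.Str.lower chunks[j]))).contains w) := by
      apply List.filter_congr
      intro w _
      rw [hidx w]
      have hiff : ((j : Int) ∈ (((PySem.List.enumerate (chunks.map (fun c => PySem.Set.ofList (PySem.Str.split₀ (PySem.Str.lower c))))).filter (fun p => decide (w ∈ p.2))).map (·.1)))
          ↔ w ∈ PySem.Set.ofList (PySem.Str.split₀ (PySem.Str.lower chunks[j])) := by
        rw [pv_idx_mem]
        constructor
        · rintro ⟨k, hk, hkj, hw⟩
          have hkj' : k = j := by omega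
          subst hkj'
          simpa using hw
        · intro hw
          exact ⟨j, by simpa using hjn, rfl, by simpa using hw⟩
      by_cases h : w ∈ PySem.Set.ofList (PySem.Str.split₀ (PySem.Str.lower chunks[j]))
      · rw [(PySem.Set.contains_iff _ _).mpr h]
        simp [hiff.mpr h]
      · have hc : (PySem.Set.ofList (PySem.Str.split₀ (PySem.Str.lower chunks[j]))).contains w = false := by
          cases hc : (PySem.Set.ofList (PySem.Str.split₀ (PySem.Str.lower chunks[j]))).contains w
          · rfl
          · exact absurd ((PySem.Set.contains_iff _ _).mp hc) h
        rw [hc]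
        simp [hiff, h]
    rw [hfc]
    simp only [PySem.Set.inter, List.length_nil, Nat.sub_zero, List.getElem_replicate]
    push_cast
    ring

-- ===== VERDICT (by name: the statement is the Claim_ definition above) =====
theorem keyword_rerank_py_spec : Claim_equal_keyword_rerank_py := by
  intro query chunks top_k _hdom
  unfold Spec_keyword_rerank_py keyword_rerank_py keyword_rerank_py_alt
  simp only
  rw [pv_scored_eq (PySem.Set.ofList (PySem.Str.split₀ (PySem.Str.lower query))) chunks]
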